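-- pv_equiv track=rewrite | github.com/jananjahedd/Imperative_programming | tricky.py | is_tricky_square
-- ===== SOURCE A (Python) =====
-- import math
--
-- def perfect_square(user_input):
--     #uses the sqrt function from the math library to calculate the sqrt of user input
--     sqrt_num = math.isqrt(user_input)
--     #checks if the input is the square of the sqrt which shows a perfect square and if so, it return it
--     #https://www.javatpoint.com/how-to-check-for-a-perfect-square-in-python
--     return sqrt_num * sqrt_num == user_input
--
-- def is_tricky_square(num):
--     #nested function since it can only a tricky square iff it is a perfect square
--     if not perfect_square(num):
--         return False
--
--     #Here we convert num into a string so we can count the frequency of each digit occuring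
--     number = str(num)
--     # Make a counter to count the frequency of a digit occuring in the string - it can be an int from 0 - 9
--     digit_count = [0 for _ in range(10)]
--
--     #We count how mant times the digit occured by looping through the string
--     for digit in number:
--         digit_count[int(digit)] += 1
--
--     #Variable to check how many dublicates there are since we're only allowed max 1
--     repeated = 0
--     #This loops checks how many dublicates there are, if it's more than 1 then it's not tricky
--     for count in digit_count:
--         if count > 1:
--             repeated += 1
--             if repeated > 1:
--                 return False
--     #If there's only 1 then it's tricky
--     return repeated == 1
-- ===== SOURCE B (Python) =====
-- import math
-- from itertools import groupby
--
-- def is_tricky_square(num):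
--     root = math.isqrt(num)
--     if root * root != num:
--         return False
--     repeats = sum(1 for _, g in groupby(sorted(str(num))) if len(list(g)) >= 2)
--     return repeats == 1
-- ===== Notes on version B (the rewrite author's own statement) =====
-- stated objective: alternative
-- what changed: Replaced the fixed 10-bucket digit-frequency array and its early-exit scan by sorting the digit string and counting runs of length >= 2 (itertools.groupby), keeping the isqrt perfect-square guard.
import Mathlib
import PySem

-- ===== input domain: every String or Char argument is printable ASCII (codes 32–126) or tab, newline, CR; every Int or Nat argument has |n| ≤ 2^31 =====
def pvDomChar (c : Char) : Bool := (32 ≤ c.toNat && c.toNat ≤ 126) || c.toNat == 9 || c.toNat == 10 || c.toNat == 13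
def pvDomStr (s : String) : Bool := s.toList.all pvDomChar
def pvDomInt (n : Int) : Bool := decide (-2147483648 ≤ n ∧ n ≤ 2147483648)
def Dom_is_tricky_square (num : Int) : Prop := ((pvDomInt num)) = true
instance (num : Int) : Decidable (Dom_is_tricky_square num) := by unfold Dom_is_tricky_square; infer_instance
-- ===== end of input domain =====

-- B replaces A's 10-bucket digit-frequency table and early-exit scan by sort + run-length
-- grouping of the digit string (objective: alternative decomposition, no speed claim).

-- ===== PORT A =====
-- math.isqrt(x) is Nat.sqrt for x ≥ 0 (negative x raises ValueError and is outside Pre_).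
def pvPerfectSquare (user_input : Int) : Bool :=
  let sqrt_num : Int := (Nat.sqrt user_input.toNat : Int)
  sqrt_num * sqrt_num == user_input

-- digit_count[int(digit)] += 1 over the string; int(digit) is PySem.Int.ofChars? on the
-- one-char string (always a single decimal digit here since num ≥ 0, so the list index never raises).
def pvDigitCountLoop (number : List Char) (dc : List Int) : List Int :=
  number.foldl (fun dc digit =>
    let k := ((PySem.Int.ofChars? [digit]).getD 0).toNat
    dc.set k (dc.getD k 0 + 1)) dc

-- the second loop, with its early 'return False' once a second repeated digit is seen
def pvRepeatedLoop : List Int → Int → Bool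
  | [], repeated => repeated == 1
  | count :: rest, repeated =>
    if count > 1 then
      if repeated + 1 > 1 then false
      else pvRepeatedLoop rest (repeated + 1)
    else pvRepeatedLoop rest repeated

def is_tricky_square (num : Int) : Bool :=
  if !pvPerfectSquare num then false
  else
    let number := PySem.Int.toChars num
    let digit_count := pvDigitCountLoop number (List.replicate 10 (0 : Int))
    pvRepeatedLoop digit_count 0

-- ===== PORT B =====
-- itertools.groupby over the sorted string: the list of run lengths
def pvRunLengths : List Char → List Nat
  | [] => []
  | [_] => [1]
  | a :: b :: rest =>
    match pvRunLengths (b :: rest) with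
    | n :: t => if a == b then (n + 1) :: t else 1 :: n :: t
    | [] => [1]

def is_tricky_square_alt (num : Int) : Bool :=
  let root : Int := (Nat.sqrt num.toNat : Int)
  if root * root != num then false
  else
    let repeats :=
      ((pvRunLengths (PySem.List.sorted (PySem.Int.toChars num) (fun c => c) false)).filter
        (fun n => 2 ≤ n)).length
    repeats == 1

-- ===== PRECONDITION & SPEC =====
-- math.isqrt raises ValueError on negative input (in both A and B), so Pre_ is num ≥ 0.
def Pre_is_tricky_square (num : Int) : Prop := 0 ≤ num
instance (num : Int) : Decidable (Pre_is_tricky_square num) := by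
  unfold Pre_is_tricky_square; infer_instance

def pvWitness_is_tricky_square : Int := 25

def Spec_is_tricky_square (num : Int) (out : Bool) : Prop := out = is_tricky_square_alt num
instance (num : Int) (out : Bool) : Decidable (Spec_is_tricky_square num out) := by
  unfold Spec_is_tricky_square; infer_instance

-- ===== CLAIM (what is proved, stated in full; the proofs are below) =====
def Claim_equal_is_tricky_square : Prop :=
  ∀ (num : Int), Dom_is_tricky_square num → Pre_is_tricky_square num →
    Spec_is_tricky_square num (is_tricky_square num)

-- ===== LEMMAS AND PROOFS =====

-- the ten digit characters
def pvDigits : List Char := ['0','1','2','3','4','5','6','7','8','9']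

-- int(single digit char), as A's loop computes it, then .toNat
def pvDval (c : Char) : Nat := ((PySem.Int.ofChars? [c]).getD 0).toNat

theorem pvDval_eq : ∀ c ∈ pvDigits, pvDval c = c.toNat - 48 := by
  intro c hc; fin_cases hc <;> decide

theorem pvDval_map : pvDigits.map pvDval = List.range 10 := by
  rw [List.map_congr_left pvDval_eq]; decide

theorem pvDval_inj : ∀ x ∈ pvDigits, ∀ y ∈ pvDigits, (pvDval x = pvDval y ↔ x = y) := by
  intro x hx y hy
  rw [pvDval_eq x hx, pvDval_eq y hy]
  fin_cases hx <;> fin_cases hy <;> simp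

theorem pvDval_lt : ∀ x ∈ pvDigits, pvDval x < 10 := by
  intro x hx; rw [pvDval_eq x hx]; fin_cases hx <;> decide

theorem pvDigitChar_mem (m : Nat) (h : m < 10) : Nat.digitChar m ∈ pvDigits := by
  interval_cases m <;> decide

-- every character of Nat.toDigits 10 is one of the ten digit characters
theorem pvToDigitsCore_mem (f : Nat) :
    ∀ (n : Nat) (ds : List Char), (∀ c ∈ ds, c ∈ pvDigits) →
      ∀ c ∈ Nat.toDigitsCore 10 f n ds, c ∈ pvDigits := by
  induction f with
  | zero => intro n ds hds c hc; exact hds c hc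
  | succ f ih =>
    intro n ds hds c hc
    simp only [Nat.toDigitsCore] at hc
    by_cases h : n / 10 = 0
    · simp only [h] at hc
      rcases List.mem_cons.mp hc with h1 | h1
      · exact h1 ▸ pvDigitChar_mem _ (Nat.mod_lt _ (by norm_num))
      · exact hds c h1
    · rw [if_neg h] at hc
      exact ih (n / 10) _ (by
        intro c hc
        rcases List.mem_cons.mp hc with h1 | h1
        · exact h1 ▸ pvDigitChar_mem _ (Nat.mod_lt _ (by norm_num))
        · exact hds c h1) c hc

theorem pvToChars_mem (num : Int) (h : 0 ≤ num) :
    ∀ c ∈ PySem.Int.toChars num, c ∈ pvDigits := by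
  intro c hc
  simp only [PySem.Int.toChars, if_neg (by omega : ¬ num < 0)] at hc
  exact pvToDigitsCore_mem _ _ [] (by simp) c hc

-- A's second loop counts buckets > 1 and tests the total against 1
theorem pvRepeatedLoop_eq (xs : List Int) :
    ∀ r : Int, 0 ≤ r →
      pvRepeatedLoop xs r = decide (r + (xs.countP (fun c => 1 < c) : Int) = 1) := by
  induction xs with
  | nil =>
    intro r _
    simp only [pvRepeatedLoop, List.countP_nil, Nat.cast_zero, add_zero]
    rw [Bool.beq_eq_decide_eq]
  | cons count rest ih =>
    intro r hr
    simp only [pvRepeatedLoop]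
    by_cases h : count > 1
    · rw [if_pos h]
      by_cases h2 : r + 1 > 1
      · rw [if_pos h2]
        simp only [List.countP_cons, decide_eq_true_eq, if_pos h]
        symm; simp only [decide_eq_false_iff_not]
        push_cast; omega
      · rw [if_neg h2, ih (r + 1) (by omega)]
        congr 1
        simp only [List.countP_cons, if_pos (decide_eq_true h)]
        push_cast; ring_nf
    · rw [if_neg h, ih r hr]
      congr 2
      simp only [List.countP_cons, decide_eq_true_eq]
      rw [if_neg (by simpa using h), add_zero]

-- A's first loop builds the histogram: cell i holds init[i] plus the digits mapping to i
theorem pvDigitCountLoop_get (ds : List Char) :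
    ∀ (dc : List Int), (∀ c ∈ ds, pvDval c < dc.length) →
      (pvDigitCountLoop ds dc).length = dc.length ∧
      ∀ i : Nat, (pvDigitCountLoop ds dc)[i]? =
        (dc[i]?).map (fun x => x + (ds.countP (fun c => pvDval c = i) : Int)) := by
  induction ds with
  | nil =>
    intro dc h
    refine ⟨rfl, fun i => ?_⟩
    cases h' : dc[i]? <;> simp [pvDigitCountLoop, h']
  | cons d ds ih =>
    intro dc h
    have hk : pvDval d < dc.length := h d List.mem_cons_self
    have hstep : pvDigitCountLoop (d :: ds) dc =
        pvDigitCountLoop ds (dc.set (pvDval d) (dc.getD (pvDval d) 0 + 1)) := rfl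
    have hlen : (dc.set (pvDval d) (dc.getD (pvDval d) 0 + 1)).length = dc.length :=
      List.length_set ..
    obtain ⟨ihl, ihg⟩ := ih (dc.set (pvDval d) (dc.getD (pvDval d) 0 + 1))
      (fun c hc => by rw [hlen]; exact h c (List.mem_cons_of_mem _ hc))
    refine ⟨by rw [hstep, ihl, hlen], fun i => ?_⟩
    rw [hstep, ihg i]
    by_cases hi : pvDval d = i
    · subst hi
      rw [List.getElem?_set_self', List.getElem?_eq_getElem hk, List.getD_eq_getElem dc 0 hk]
      simp only [List.countP_cons, decide_eq_true_eq, Function.const,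
        Option.map_eq_map, Option.map]
      congr 1
      push_cast
      ring
    · rw [List.getElem?_set_ne hi]
      congr 1
      funext x
      simp only [List.countP_cons, decide_eq_true_eq, if_neg hi, add_zero]

-- the histogram over the initial all-zero table, as a map over range 10
theorem pvDigitCountLoop_eq (ds : List Char) (hd : ∀ c ∈ ds, c ∈ pvDigits) :
    pvDigitCountLoop ds (List.replicate 10 (0 : Int)) =
      (List.range 10).map (fun i => (ds.countP (fun c => pvDval c = i) : Int)) := by
  obtain ⟨hl, hg⟩ := pvDigitCountLoop_get ds (List.replicate 10 0)
    (fun c hc => by simpa using pvDval_lt c (hd c hc))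
  apply List.ext_getElem?
  intro i
  rw [hg i]
  by_cases hi : i < 10
  · have hi1 : i < (List.replicate 10 (0 : Int)).length := by simpa using hi
    have hi2 : i <
        ((List.range 10).map (fun i => (ds.countP (fun c => pvDval c = i) : Int))).length := by
      simpa using hi
    rw [List.getElem?_eq_getElem hi1, List.getElem?_eq_getElem hi2]
    simp only [Option.map_some, List.getElem_replicate, List.getElem_map, List.getElem_range,
      Option.some.injEq]
    ring
  · rw [List.getElem?_eq_none (by simpa using hi), List.getElem?_eq_none (by simpa using hi)]
    rfl

-- run lengths of a::ys split off the leading run (no ordering hypothesis needed)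
theorem pvRunLengths_cons (a : Char) (ys : List Char) :
    pvRunLengths (a :: ys) =
      ((ys.takeWhile (fun c => c == a)).length + 1) ::
        pvRunLengths (ys.dropWhile (fun c => c == a)) := by
  induction ys generalizing a with
  | nil => rfl
  | cons b rest ih =>
    by_cases hab : (b == a) = true
    · have hb : b = a := by simpa using hab
      subst hb
      have h1 : pvRunLengths (b :: b :: rest) =
          (((rest.takeWhile (fun c => c == b)).length + 1) + 1) ::
            pvRunLengths (rest.dropWhile (fun c => c == b)) := by
        simp only [pvRunLengths]
        rw [ih b]
        simp
      rw [h1, List.takeWhile_cons, List.dropWhile_cons]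
      simp
    · have hba : ¬ (a == b) = true := by
        simp only [beq_iff_eq] at hab ⊢
        exact fun h => hab h.symm
      have h1 : pvRunLengths (a :: b :: rest) = 1 :: pvRunLengths (b :: rest) := by
        simp only [pvRunLengths]
        rw [ih b]
        simp [hba]
      rw [h1, List.takeWhile_cons, List.dropWhile_cons]
      simp [hab]

-- two nodup lists with the same members on p have the same countP
theorem pvCountP_eq_of_nodup (u v : List Char) (p : Char → Bool)
    (hu : u.Nodup) (hv : v.Nodup) (hm : ∀ c, p c = true → (c ∈ u ↔ c ∈ v)) :
    u.countP p = v.countP p := by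
  rw [List.countP_eq_length_filter, List.countP_eq_length_filter]
  refine ((List.perm_ext_iff_of_nodup (hu.filter p) (hv.filter p)).mpr ?_).length_eq
  intro c
  simp only [List.mem_filter]
  constructor
  · rintro ⟨h1, h2⟩; exact ⟨(hm c h2).mp h1, h2⟩
  · rintro ⟨h1, h2⟩; exact ⟨(hm c h2).mpr h1, h2⟩

theorem pvSetAdd_cons (s : List Char) (a z : Char) (h : z ≠ a) :
    PySem.Set.add (a :: s) z = a :: PySem.Set.add s z := by
  simp only [PySem.Set.add, PySem.Set.contains, List.contains_cons]
  rw [show (z == a) = false by simpa using h]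
  simp only [Bool.false_or]
  by_cases hz : z ∈ s <;> simp [hz]

theorem pvFoldlAdd_cons (zs : List Char) :
    ∀ (s : List Char) (a : Char), a ∉ zs →
      zs.foldl PySem.Set.add (a :: s) = a :: zs.foldl PySem.Set.add s := by
  induction zs with
  | nil => intro s a _; rfl
  | cons z zs ih =>
    intro s a ha
    rw [List.foldl_cons, List.foldl_cons,
      pvSetAdd_cons s a z (by rintro rfl; exact ha List.mem_cons_self)]
    exact ih _ a (fun h => ha (List.mem_cons_of_mem _ h))

theorem pvFoldlAdd_absorb (tw : List Char) (a : Char) (h : ∀ c ∈ tw, c = a) :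
    tw.foldl PySem.Set.add [a] = [a] := by
  induction tw with
  | nil => rfl
  | cons c tw ih =>
    rw [List.foldl_cons, show PySem.Set.add [a] c = [a] by
      simp [PySem.Set.add, PySem.Set.contains, h c List.mem_cons_self]]
    exact ih (fun c hc => h c (List.mem_cons_of_mem _ hc))

theorem pvOfList_run_cons (a : Char) (tw dr : List Char)
    (htw : ∀ c ∈ tw, c = a) (hdr : a ∉ dr) :
    PySem.Set.ofList (a :: (tw ++ dr)) = a :: PySem.Set.ofList dr := by
  simp only [PySem.Set.ofList, PySem.Set.empty, List.foldl_cons, List.foldl_append]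
  rw [show PySem.Set.add [] a = [a] from rfl, pvFoldlAdd_absorb tw a htw]
  exact pvFoldlAdd_cons dr [] a hdr

-- on a sorted list, runs of length ≥ 2 count the distinct elements of multiplicity ≥ 2
theorem pvRuns_main :
    ∀ (n : Nat) (ys : List Char), ys.length ≤ n → ys.Pairwise (· ≤ ·) →
      ((pvRunLengths ys).filter (fun k => 2 ≤ k)).length =
        (PySem.Set.ofList ys).countP (fun c => 2 ≤ ys.count c) := by
  intro n
  induction n with
  | zero =>
    intro ys hl _
    rw [List.length_eq_zero_iff.mp (Nat.le_zero.mp hl)]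
    rfl
  | succ n ih =>
    intro ys hl hp
    match ys with
    | [] => rfl
    | a :: t =>
      have htwa : ∀ c ∈ t.takeWhile (fun c => c == a), c = a := fun c hc => by
        simpa using List.mem_takeWhile_imp hc
      have htsplit : t.takeWhile (fun c => c == a) ++ t.dropWhile (fun c => c == a) = t :=
        List.takeWhile_append_dropWhile
      have hta : ∀ c ∈ t, a ≤ c := fun c hc => (List.pairwise_cons.mp hp).1 c hc
      have hpt : t.Pairwise (· ≤ ·) := (List.pairwise_cons.mp hp).2
      have hpdr : (t.dropWhile (fun c => c == a)).Pairwise (· ≤ ·) :=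
        hpt.sublist (List.dropWhile_sublist _)
      have hadr : a ∉ t.dropWhile (fun c => c == a) := by
        intro hmem
        have hne : t.dropWhile (fun c => c == a) ≠ [] := by
          intro h0; rw [h0] at hmem; exact List.not_mem_nil hmem
        have hhead : ((t.dropWhile (fun c => c == a)).head hne == a) = false :=
          List.head_dropWhile_not _ hne
        obtain ⟨c0, zs, hdr'⟩ := List.exists_cons_of_ne_nil hne
        have hc0 : c0 ≠ a := by
          have h1 : (t.dropWhile (fun c => c == a)).head hne = c0 := by simp [hdr']
          rw [h1] at hhead
          simpa using hhead
        have hc0t : c0 ∈ t :=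
          List.Sublist.mem (hdr' ▸ (List.mem_cons_self : c0 ∈ c0 :: zs))
            (List.dropWhile_sublist _)
        rw [hdr'] at hmem hpdr
        rcases List.mem_cons.mp hmem with h1 | h1
        · exact hc0 h1.symm
        · have hca : c0 ≤ a := (List.pairwise_cons.mp hpdr).1 a h1
          exact hc0 (le_antisymm hca (hta c0 hc0t))
      -- counts of a
      have hcnt_tw : (t.takeWhile (fun c => c == a)).count a =
          (t.takeWhile (fun c => c == a)).length :=
        List.count_eq_length.mpr (fun b hb => (htwa b hb).symm)
      have hcnt_at : t.count a = (t.takeWhile (fun c => c == a)).length := by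
        conv_lhs => rw [← htsplit]
        rw [List.count_append, hcnt_tw, List.count_eq_zero.mpr hadr, add_zero]
      have hcnt_a : (a :: t).count a = (t.takeWhile (fun c => c == a)).length + 1 := by
        rw [List.count_cons_self, hcnt_at]
      -- counts of the members of the dropWhile part
      have hcnt_dr : ∀ c ∈ t.dropWhile (fun c => c == a),
          (a :: t).count c = (t.dropWhile (fun c => c == a)).count c := by
        intro c hc
        have hca : c ≠ a := fun h => hadr (h ▸ hc)
        have htwc : (t.takeWhile (fun c => c == a)).count c = 0 :=
          List.count_eq_zero.mpr (fun h => hca (htwa c h))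
        have h1 : List.count c t = List.count c (t.dropWhile (fun c => c == a)) := by
          conv_lhs => rw [← htsplit]
          rw [List.count_append, htwc, zero_add]
        have hne2 : (a == c) = false := by
          simp only [beq_eq_false_iff_ne, ne_eq]
          exact fun h => hca h.symm
        simp [List.count_cons, hne2, h1]
      -- the set of a :: t
      have hset : PySem.Set.ofList (a :: t) =
          a :: PySem.Set.ofList (t.dropWhile (fun c => c == a)) := by
        conv_lhs => rw [← htsplit]
        exact pvOfList_run_cons a _ _ htwa hadr
      have hlen_dr : (t.dropWhile (fun c => c == a)).length ≤ n := by
        have h1 := List.Sublist.length_le (List.dropWhile_sublist (l := t) (fun c => c == a))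
        simp only [List.length_cons] at hl
        omega
      rw [pvRunLengths_cons, hset]
      rw [List.filter_cons, List.countP_cons]
      rw [List.countP_congr (p := fun c => decide (2 ≤ (a :: t).count c))
        (q := fun c => decide (2 ≤ (t.dropWhile (fun c => c == a)).count c))
        (fun c hc => by
          have := hcnt_dr c ((PySem.Set.mem_ofList _ _).mp hc)
          simp [this])]
      rw [hcnt_a]
      by_cases h2 : 2 ≤ (t.takeWhile (fun c => c == a)).length + 1 <;>
        simp [h2, ih _ hlen_dr hpdr]

-- ===== VERDICT (by name: the statement is the Claim_ definition above) =====
theorem is_tricky_square_spec : Claim_equal_is_tricky_square := by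
  intro num _ hpre
  unfold Spec_is_tricky_square is_tricky_square is_tricky_square_alt pvPerfectSquare
  by_cases hsq : ((Nat.sqrt num.toNat : Int) * (Nat.sqrt num.toNat : Int) == num) = true
  · simp only [hsq, bne, Bool.not_true, if_neg (Bool.false_ne_true)]
    set ds := PySem.Int.toChars num with hds
    have hd : ∀ c ∈ ds, c ∈ pvDigits := pvToChars_mem num hpre
    set ys := PySem.List.sorted ds (fun c => c) false with hys
    have hperm : ys.Perm ds := PySem.List.sorted_perm ds (fun c => c) false
    rw [pvRepeatedLoop_eq _ 0 le_rfl, pvDigitCountLoop_eq ds hd, List.countP_map]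
    have hA : List.countP ((fun c : Int => decide (1 < c)) ∘
          (fun i => (ds.countP (fun c => pvDval c = i) : Int))) (List.range 10) =
        List.countP (fun c => decide (2 ≤ ds.count c)) pvDigits := by
      rw [← pvDval_map, List.countP_map]
      apply List.countP_congr
      intro x hx
      have hcnt : ds.countP (fun c => decide (pvDval c = pvDval x)) = ds.count x := by
        rw [List.count_eq_countP]
        apply List.countP_congr
        intro c hc
        simp only [decide_eq_true_eq, beq_iff_eq]
        exact pvDval_inj c (hd c hc) x hx
      simp only [Function.comp, hcnt, decide_eq_true_eq]
      constructor
      · intro h; omega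
      · intro h; omega
    rw [hA]
    have hB : List.countP (fun c => decide (2 ≤ ds.count c)) pvDigits =
        (PySem.Set.ofList ys).countP (fun c => 2 ≤ ys.count c) := by
      have hcy : ∀ c, ys.count c = ds.count c := fun c => hperm.count_eq c
      have h1 : (fun c => decide (2 ≤ ys.count c)) = (fun c => decide (2 ≤ ds.count c)) := by
        funext c; rw [hcy]
      rw [← h1]
      apply pvCountP_eq_of_nodup _ _ _ (by decide) (PySem.Set.nodup_ofList ys)
      intro c hp
      have hcys : c ∈ ys := by
        have : 0 < ys.count c := by
          have := of_decide_eq_true hp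
          omega
        exact List.count_pos_iff.mp this
      constructor
      · intro _
        exact (PySem.Set.mem_ofList ys c).mpr hcys
      · intro _
        exact hd c (hperm.mem_iff.mp hcys)
    rw [hB, ← pvRuns_main ys.length ys le_rfl (by
      have := PySem.List.sorted_pairwise ds (fun c => c)
      simpa using this)]
    rw [Bool.beq_eq_decide_eq]
    apply decide_eq_decide.mpr
    omega
  · have hsq' : ((Nat.sqrt num.toNat : Int) * (Nat.sqrt num.toNat : Int) == num) = false :=
      by simpa using hsq
    simp only [hsq', bne, Bool.not_false, if_true]
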